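-- pv_equiv track=rewrite | github.com/JBreitenbr/spotidjango | 01-2026.py | vowel_case
-- ===== SOURCE A (Python) =====
-- def vowel_case(s):
--     v=list("aeiou")
--     c=list("BCDFGHJKLMNPQRSTVWXYZ")
--     res=""
--     for l in s:
--         if l in v:
--             res+=l.upper()
--         elif l in c:
--             res+=l.lower()
--         else:
--             res+=l
--     return res
-- ===== SOURCE B (Python) =====
-- def vowel_case(s):
--     table = str.maketrans("aeiouBCDFGHJKLMNPQRSTVWXYZ",
--                           "AEIOUbcdfghjklmnpqrstvwxyz")
--     return s.translate(table)
-- ===== Notes on version B (the rewrite author's own statement) =====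
-- stated objective: idiomatic
-- what changed: Replaces A's explicit loop with per-character if/elif membership tests in lists by a translation table built once with str.maketrans and a single s.translate call.
import Mathlib
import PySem

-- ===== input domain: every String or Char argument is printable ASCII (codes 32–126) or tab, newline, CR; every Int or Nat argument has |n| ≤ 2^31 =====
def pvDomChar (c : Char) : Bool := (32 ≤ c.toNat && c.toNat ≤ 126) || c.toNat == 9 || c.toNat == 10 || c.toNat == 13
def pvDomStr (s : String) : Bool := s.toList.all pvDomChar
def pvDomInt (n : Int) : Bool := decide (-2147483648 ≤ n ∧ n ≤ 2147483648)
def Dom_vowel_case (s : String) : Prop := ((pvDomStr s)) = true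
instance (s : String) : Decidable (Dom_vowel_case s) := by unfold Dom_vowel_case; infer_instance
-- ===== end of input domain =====

-- B replaces A's per-character if/elif chain by a translation table built once (str.maketrans)
-- and a single s.translate pass: more idiomatic, no explicit branching.

-- ===== PORT A =====
def vowel_case (s : String) : String :=
  let v := "aeiou".toList
  let c := "BCDFGHJKLMNPQRSTVWXYZ".toList
  String.mk (s.toList.foldl (fun res l =>
    if l ∈ v then res ++ [PySem.Chars.upperChar l]
    else if l ∈ c then res ++ [PySem.Chars.lowerChar l]
    else res ++ [l]) [])

-- ===== PORT B =====
-- table = str.maketrans("aeiouBCDFGHJKLMNPQRSTVWXYZ", "AEIOUbcdfghjklmnpqrstvwxyz")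
def pvTable : PySem.Dict Char Char :=
  PySem.Dict.ofList ("aeiouBCDFGHJKLMNPQRSTVWXYZ".toList.zip
                     "AEIOUbcdfghjklmnpqrstvwxyz".toList)

-- s.translate(table): each char is replaced by its table entry, or kept unchanged
def vowel_case_alt (s : String) : String :=
  String.mk (s.toList.map (fun ch => pvTable.getD ch ch))

-- ===== PRECONDITION & SPEC =====
def Spec_vowel_case (s : String) (out : String) : Prop := out = vowel_case_alt s
instance (s : String) (out : String) : Decidable (Spec_vowel_case s out) := by unfold Spec_vowel_case; infer_instance

-- ===== CLAIM (what is proved, stated in full; the proofs are below) =====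
def Claim_equal_vowel_case : Prop := ∀ (s : String), Dom_vowel_case s → Spec_vowel_case s (vowel_case s)

-- ===== LEMMAS AND PROOFS =====
-- the table lookup agrees with A's branch chain on every character
set_option maxHeartbeats 1000000 in
theorem pvTable_getD_eq (l : Char) :
    pvTable.getD l l =
      (if l ∈ "aeiou".toList then PySem.Chars.upperChar l
       else if l ∈ "BCDFGHJKLMNPQRSTVWXYZ".toList then PySem.Chars.lowerChar l
       else l) := by
  have ht : pvTable = PySem.Dict.mk [('a','A'),('e','E'),('i','I'),('o','O'),('u','U'),
    ('B','b'),('C','c'),('D','d'),('F','f'),('G','g'),('H','h'),('J','j'),('K','k'),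
    ('L','l'),('M','m'),('N','n'),('P','p'),('Q','q'),('R','r'),('S','s'),('T','t'),
    ('V','v'),('W','w'),('X','x'),('Y','y'),('Z','z')] := by decide
  by_cases h0 : l = 'a'
  · subst h0; decide
  by_cases h1 : l = 'e'
  · subst h1; decide
  by_cases h2 : l = 'i'
  · subst h2; decide
  by_cases h3 : l = 'o'
  · subst h3; decide
  by_cases h4 : l = 'u'
  · subst h4; decide
  by_cases h5 : l = 'B'
  · subst h5; decide
  by_cases h6 : l = 'C'
  · subst h6; decide
  by_cases h7 : l = 'D'
  · subst h7; decide
  by_cases h8 : l = 'F'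
  · subst h8; decide
  by_cases h9 : l = 'G'
  · subst h9; decide
  by_cases h10 : l = 'H'
  · subst h10; decide
  by_cases h11 : l = 'J'
  · subst h11; decide
  by_cases h12 : l = 'K'
  · subst h12; decide
  by_cases h13 : l = 'L'
  · subst h13; decide
  by_cases h14 : l = 'M'
  · subst h14; decide
  by_cases h15 : l = 'N'
  · subst h15; decide
  by_cases h16 : l = 'P'
  · subst h16; decide
  by_cases h17 : l = 'Q'
  · subst h17; decide
  by_cases h18 : l = 'R'
  · subst h18; decide
  by_cases h19 : l = 'S'
  · subst h19; decide
  by_cases h20 : l = 'T'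
  · subst h20; decide
  by_cases h21 : l = 'V'
  · subst h21; decide
  by_cases h22 : l = 'W'
  · subst h22; decide
  by_cases h23 : l = 'X'
  · subst h23; decide
  by_cases h24 : l = 'Y'
  · subst h24; decide
  by_cases h25 : l = 'Z'
  · subst h25; decide
  rw [ht]
  simp [PySem.Dict.getD, PySem.Dict.get?, h0, Ne.symm h0, h1, Ne.symm h1, h2, Ne.symm h2, h3, Ne.symm h3, h4, Ne.symm h4, h5, Ne.symm h5, h6, Ne.symm h6, h7, Ne.symm h7, h8, Ne.symm h8, h9, Ne.symm h9, h10, Ne.symm h10, h11, Ne.symm h11, h12, Ne.symm h12, h13, Ne.symm h13, h14, Ne.symm h14, h15, Ne.symm h15, h16, Ne.symm h16, h17, Ne.symm h17, h18, Ne.symm h18, h19, Ne.symm h19, h20, Ne.symm h20, h21, Ne.symm h21, h22, Ne.symm h22, h23, Ne.symm h23, h24, Ne.symm h24, h25, Ne.symm h25]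

-- ===== VERDICT (by name: the statement is the Claim_ definition above) =====
theorem vowel_case_spec : Claim_equal_vowel_case := by
  intro s _
  unfold Spec_vowel_case vowel_case vowel_case_alt
  have hstep : (fun (res : List Char) (l : Char) =>
      if l ∈ "aeiou".toList then res ++ [PySem.Chars.upperChar l]
      else if l ∈ "BCDFGHJKLMNPQRSTVWXYZ".toList then res ++ [PySem.Chars.lowerChar l]
      else res ++ [l]) = (fun res l => res ++ [pvTable.getD l l]) := by
    funext res l
    rw [pvTable_getD_eq l]; split_ifs <;> rfl
  simp only []
  rw [hstep, PySem.List.foldl_append_singleton_eq_map, List.nil_append]
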